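-- pv_equiv track=rewrite | github.com/whereAGI/orwell | orwell/stream_parser.py | _find_first_tag
-- ===== SOURCE A (Python) =====
-- from typing import List, Tuple, Optional, Dict, Any
--
-- def _find_first_tag(text: str, tags: List[str]) -> Tuple[Optional[str], int]:
--     """Find the earliest occurrence of any tag in the text."""
--     best_tag = None
--     best_index = -1
--
--     for tag in tags:
--         idx = text.find(tag)
--         if idx != -1:
--             if best_index == -1 or idx < best_index:
--                 best_index = idx
--                 best_tag = tag
--
--     return best_tag, best_index
-- ===== SOURCE B (Python) =====
-- def _find_first_tag(text, tags):
--     """Single left-to-right scan of the text: the first position where any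
--     tag starts is the answer; the first tag (in tags order) matching there
--     reproduces A's tie-break."""
--     for i in range(len(text) + 1):
--         for tag in tags:
--             if text.startswith(tag, i):
--                 return tag, i
--     return None, -1
-- ===== Notes on version B (the rewrite author's own statement) =====
-- stated objective: alternative
-- what changed: Instead of calling text.find for every tag and keeping the minimum index, B scans the text positions left to right once and returns at the first position where any tag starts (first tag in list order, reproducing A's tie-break).
import Mathlib
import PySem

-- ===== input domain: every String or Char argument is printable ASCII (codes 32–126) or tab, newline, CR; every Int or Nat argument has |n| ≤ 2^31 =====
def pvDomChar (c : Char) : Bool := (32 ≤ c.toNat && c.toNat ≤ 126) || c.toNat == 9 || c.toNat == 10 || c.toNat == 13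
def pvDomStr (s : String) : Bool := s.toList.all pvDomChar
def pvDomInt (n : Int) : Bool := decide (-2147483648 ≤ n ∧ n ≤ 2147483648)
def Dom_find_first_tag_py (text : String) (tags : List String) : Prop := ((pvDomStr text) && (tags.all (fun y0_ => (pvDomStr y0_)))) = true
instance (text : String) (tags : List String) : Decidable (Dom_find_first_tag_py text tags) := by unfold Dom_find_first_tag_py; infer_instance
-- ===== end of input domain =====

-- B replaces A's per-tag text.find minimum with one left-to-right scan of the
-- text positions (alternative decomposition; return values proved identical).

-- ===== PORT A =====
-- literal transliteration of A's loop: for each tag, idx = text.find(tag);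
-- keep (tag, idx) when idx != -1 and (best_index == -1 or idx < best_index)
def find_first_tag_py (text : String) (tags : List String) : Option String × Int :=
  tags.foldl
    (fun (st : Option String × Int) tag =>
      let idx := PySem.Str.find text tag
      if idx ≠ -1 then
        if st.2 = -1 ∨ idx < st.2 then (some tag, idx) else st
      else st)
    (none, -1)

-- ===== PORT B =====
-- inner loop of Source B: first tag (in order) with text.startswith(tag, i);
-- text.startswith(tag, i) for 0 ≤ i ≤ len(text) is exactly: tag is a prefix of text[i:]
def altFindAt (tags : List String) (t : List Char) (i : Nat) : Option String :=
  tags.find? (fun tag => PySem.Chars.startswith (t.drop i) tag.toList)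

-- outer loop of Source B: i = 0 .. len(text); fuel counts the remaining positions
def altLoop (tags : List String) (t : List Char) (i : Nat) : Nat → Option String × Int
  | 0 => (none, -1)
  | fuel + 1 =>
    match altFindAt tags t i with
    | some tag => (some tag, (i : Int))
    | none => altLoop tags t (i + 1) fuel

def find_first_tag_py_alt (text : String) (tags : List String) : Option String × Int :=
  altLoop tags text.toList 0 (text.toList.length + 1)

-- ===== PRECONDITION & SPEC =====
def Spec_find_first_tag_py (text : String) (tags : List String) (out : Option String × Int) : Prop := out = find_first_tag_py_alt text tags
instance (text : String) (tags : List String) (out : Option String × Int) : Decidable (Spec_find_first_tag_py text tags out) := by unfold Spec_find_first_tag_py; infer_instance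

-- ===== CLAIM (what is proved, stated in full; the proofs are below) =====
def Claim_equal_find_first_tag_py : Prop := ∀ (text : String) (tags : List String), Dom_find_first_tag_py text tags → Spec_find_first_tag_py text tags (find_first_tag_py text tags)

-- ===== LEMMAS AND PROOFS =====

-- characterization of A's fold state relative to the processed tags `done`
def AState (t : List Char) (done : List String) (st : Option String × Int) : Prop :=
  (st = (none, -1) ∧ ∀ tag ∈ done, PySem.Chars.find t tag.toList = -1) ∨
  (∃ tg pre suf, st = (some tg, PySem.Chars.find t tg.toList) ∧
     0 ≤ PySem.Chars.find t tg.toList ∧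
     done = pre ++ tg :: suf ∧
     (∀ tag ∈ pre, PySem.Chars.find t tag.toList = -1 ∨
        PySem.Chars.find t tg.toList < PySem.Chars.find t tag.toList) ∧
     (∀ tag ∈ done, PySem.Chars.find t tag.toList = -1 ∨
        PySem.Chars.find t tg.toList ≤ PySem.Chars.find t tag.toList))

theorem AState_fold (t : List Char) :
    ∀ (tags done : List String) (st : Option String × Int), AState t done st →
    AState t (done ++ tags)
      (tags.foldl
        (fun (st : Option String × Int) tag =>
          let idx := PySem.Chars.find t tag.toList
          if idx ≠ -1 then
            if st.2 = -1 ∨ idx < st.2 then (some tag, idx) else st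
          else st)
        st) := by
  intro tags
  induction tags with
  | nil => intro done st h; simpa using h
  | cons tag rest ih =>
    intro done st h
    have hstep : AState t (done ++ [tag])
        ((fun (st : Option String × Int) tag =>
          let idx := PySem.Chars.find t tag.toList
          if idx ≠ -1 then
            if st.2 = -1 ∨ idx < st.2 then (some tag, idx) else st
          else st) st tag) := by
      simp only []
      by_cases hidx : PySem.Chars.find t tag.toList = -1
      · simp only [hidx, ne_eq, not_true_eq_false, if_false]
        rcases h with ⟨hst, hall⟩ | ⟨tg, pre, suf, hst, hpos, hdone, hpre, hall⟩
        · exact Or.inl ⟨hst, by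
            intro x hx
            rcases List.mem_append.1 hx with hx | hx
            · exact hall x hx
            · simp at hx; subst hx; exact hidx⟩
        · refine Or.inr ⟨tg, pre, suf ++ [tag], hst, hpos, by simp [hdone], hpre, ?_⟩
          intro x hx
          rcases List.mem_append.1 hx with hx | hx
          · exact hall x hx
          · simp at hx; subst hx; exact Or.inl hidx
      · have hge : 0 ≤ PySem.Chars.find t tag.toList := by
          have := PySem.Chars.neg_one_le_find t tag.toList
          omega
        simp only [hidx, ne_eq, not_false_eq_true, if_true]
        by_cases hupd : st.2 = -1 ∨ PySem.Chars.find t tag.toList < st.2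
        · simp only [hupd, if_true]
          rcases h with ⟨hst, hall⟩ | ⟨tg, pre, suf, hst, hpos, hdone, hpre, hall⟩
          · refine Or.inr ⟨tag, done, [], rfl, hge, by simp, ?_, ?_⟩
            · intro x hx; exact Or.inl (hall x hx)
            · intro x hx
              rcases List.mem_append.1 hx with hx | hx
              · exact Or.inl (hall x hx)
              · simp at hx; subst hx; exact Or.inr le_rfl
          · have hst2 : st.2 = PySem.Chars.find t tg.toList := by rw [hst]
            have hlt : PySem.Chars.find t tag.toList < PySem.Chars.find t tg.toList := by
              rcases hupd with h1 | h1
              · omega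
              · omega
            refine Or.inr ⟨tag, done, [], rfl, hge, by simp, ?_, ?_⟩
            · intro x hx
              rcases hall x hx with h2 | h2
              · exact Or.inl h2
              · exact Or.inr (by omega)
            · intro x hx
              rcases List.mem_append.1 hx with hx | hx
              · rcases hall x hx with h2 | h2
                · exact Or.inl h2
                · exact Or.inr (by omega)
              · simp at hx; subst hx; exact Or.inr le_rfl
        · simp only [hupd, if_false]
          rcases h with ⟨hst, hall⟩ | ⟨tg, pre, suf, hst, hpos, hdone, hpre, hall⟩
          · exfalso; rw [hst] at hupd; exact hupd (Or.inl rfl)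
          · have hst2 : st.2 = PySem.Chars.find t tg.toList := by rw [hst]
            have hle : PySem.Chars.find t tg.toList ≤ PySem.Chars.find t tag.toList := by
              rw [hst2] at hupd; omega
            refine Or.inr ⟨tg, pre, suf ++ [tag], hst, hpos, by simp [hdone], hpre, ?_⟩
            intro x hx
            rcases List.mem_append.1 hx with hx | hx
            · exact hall x hx
            · simp at hx; subst hx; exact Or.inr hle
    rw [List.foldl_cons, List.append_cons]
    exact ih (done ++ [tag]) _ hstep

-- B's scan returns (none,-1) when no tag ever matches
theorem altLoop_none (tags : List String) (t : List Char)
    (hno : ∀ (i : Nat) (tag : String), tag ∈ tags → ¬ tag.toList <+: t.drop i) :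
    ∀ (fuel i : Nat), altLoop tags t i fuel = (none, -1) := by
  intro fuel
  induction fuel with
  | zero => intro i; rfl
  | succ n ih =>
    intro i
    have hfa : altFindAt tags t i = none := by
      apply List.find?_eq_none.2
      intro tag htag
      simp only [PySem.Chars.startswith_iff]
      exact hno i tag htag
    simp [altLoop, hfa, ih]

-- B's scan stops exactly at position jn with the first matching tag
theorem altLoop_hit (tags : List String) (t : List Char) (jn : Nat) (tg : String)
    (hbefore : ∀ i < jn, ∀ tag ∈ tags, ¬ tag.toList <+: t.drop i)
    (hat : altFindAt tags t jn = some tg) :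
    ∀ (fuel i : Nat), i ≤ jn → jn < i + fuel →
      altLoop tags t i fuel = (some tg, (jn : Int)) := by
  intro fuel
  induction fuel with
  | zero => intro i h1 h2; omega
  | succ n ih =>
    intro i h1 h2
    by_cases heq : i = jn
    · subst heq; simp [altLoop, hat]
    · have hlt : i < jn := by omega
      have hfa : altFindAt tags t i = none := by
        apply List.find?_eq_none.2
        intro tag htag
        simp only [PySem.Chars.startswith_iff]
        exact hbefore i hlt tag htag
      simp only [altLoop, hfa]
      exact ih (i + 1) (by omega) (by omega)

-- ===== VERDICT (by name: the statement is the Claim_ definition above) =====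
theorem find_first_tag_py_spec : Claim_equal_find_first_tag_py := by
  intro text tags _
  unfold Spec_find_first_tag_py find_first_tag_py find_first_tag_py_alt
  have hA := AState_fold text.toList tags [] (none, -1) (Or.inl ⟨rfl, by simp⟩)
  simp only [List.nil_append] at hA
  have hfold :
      tags.foldl
        (fun (st : Option String × Int) tag =>
          let idx := PySem.Str.find text tag
          if idx ≠ -1 then
            if st.2 = -1 ∨ idx < st.2 then (some tag, idx) else st
          else st)
        (none, -1)
      = tags.foldl
        (fun (st : Option String × Int) tag =>
          let idx := PySem.Chars.find text.toList tag.toList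
          if idx ≠ -1 then
            if st.2 = -1 ∨ idx < st.2 then (some tag, idx) else st
          else st)
        (none, -1) := by
    simp [PySem.Str.find_eq]
  rw [hfold]
  rcases hA with ⟨hst, hall⟩ | ⟨tg, pre, suf, hst, hpos, hdone, hpre, hall⟩
  · rw [hst]
    symm
    apply altLoop_none
    intro i tag htag hpref
    have hocc : tag.toList <:+: text.toList :=
      hpref.isInfix.trans (List.drop_suffix i text.toList).isInfix
    exact (PySem.Chars.find_ne_neg_one_iff text.toList tag.toList).2 hocc (hall tag htag)
  · rw [hst]
    set j := PySem.Chars.find text.toList tg.toList with hj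
    have hjle : j ≤ (text.toList.length : Int) := PySem.Chars.find_le_length text.toList tg.toList
    have hspec := PySem.Chars.find_spec (s := text.toList) (sub := tg.toList) hpos
    have hjn : ((j.toNat : Nat) : Int) = j := Int.toNat_of_nonneg hpos
    have hbefore : ∀ i < j.toNat, ∀ tag ∈ tags, ¬ tag.toList <+: text.toList.drop i := by
      intro i hi tag htag hpref
      rcases hall tag htag with hneg | hle
      · have hocc : tag.toList <:+: text.toList :=
          hpref.isInfix.trans (List.drop_suffix i text.toList).isInfix
        exact (PySem.Chars.find_ne_neg_one_iff text.toList tag.toList).2 hocc hneg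
      · have hpos' : (0:Int) ≤ PySem.Chars.find text.toList tag.toList := le_trans hpos hle
        have hspec' := PySem.Chars.find_spec (s := text.toList) (sub := tag.toList) hpos'
        have hi' : i < (PySem.Chars.find text.toList tag.toList).toNat := by omega
        exact hspec'.2 i hi' hpref
    have hat : altFindAt tags text.toList j.toNat = some tg := by
      unfold altFindAt
      rw [hdone]
      rw [List.find?_append]
      have hprenone : pre.find? (fun tag => PySem.Chars.startswith (text.toList.drop j.toNat) tag.toList) = none := by
        apply List.find?_eq_none.2
        intro tag htag
        simp only [PySem.Chars.startswith_iff]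
        intro hpref
        rcases hpre tag htag with hneg | hlt
        · have hocc : tag.toList <:+: text.toList :=
            hpref.isInfix.trans (List.drop_suffix j.toNat text.toList).isInfix
          exact (PySem.Chars.find_ne_neg_one_iff text.toList tag.toList).2 hocc hneg
        · have hpos' : (0:Int) ≤ PySem.Chars.find text.toList tag.toList := by omega
          have hspec' := PySem.Chars.find_spec (s := text.toList) (sub := tag.toList) hpos'
          have hj' : j.toNat < (PySem.Chars.find text.toList tag.toList).toNat := by omega
          exact hspec'.2 j.toNat hj' hpref
      rw [hprenone]
      simp only [Option.none_or]
      exact List.find?_cons_of_pos (l := suf)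
        (h := by simpa [PySem.Chars.startswith_iff, hj] using hspec.1)
    symm
    have := altLoop_hit tags text.toList j.toNat tg hbefore hat
      (text.toList.length + 1) 0 (by omega) (by omega)
    rw [this, hjn]
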